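-- pv_equiv track=rewrite | github.com/chikinn/skat | skat_classes.py | jack_multiplier
-- ===== SOURCE A (Python) =====
-- SUITS        = 'dshc'
--
-- ORDER        = '789qktaj'
--
-- GAMES        = ('null', 'diamonds', 'spades', 'hearts', 'clubs', 'grand')
--
-- def all_trumps(gameType):
--     """Return the entire trump suit (list of str) for the given gameType."""
--     allTrumps = [] # For a null game, this will be returned unmodified.
--     if gameType != 'null':
--         if gameType != 'grand':
--             allTrumps += [val + gameType[0] for val in ORDER[:-1]]
--         allTrumps += ['j' + suit for suit in SUITS]
--     return allTrumps
--
-- def jack_multiplier(heldTrumps, gameType):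
--     """Return the jack multiplier (0 < int < 12), for calculating game value.
--
--     heldTrumps (list of str): Combined trump in kitty and declarer's hand.
--     """
--     assert gameType in GAMES
--     if gameType == 'null':
--         return None
--
--     allTrumps = all_trumps(gameType)
--     hasHighTrump = 'jc' in heldTrumps
--
--     for i in range(2, len(allTrumps) + 1): # Backward from top
--         hasThisTrump = allTrumps[-i] in heldTrumps
--         if hasThisTrump != hasHighTrump: # Breaks the streak
--             break
--     else:
--         i += 1 # Has (or is missing!) a complete set of trump
--
--     return i - 1
-- ===== SOURCE B (Python) =====
-- SUITS        = 'dshc'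
--
-- ORDER        = '789qktaj'
--
-- GAMES        = ('null', 'diamonds', 'spades', 'hearts', 'clubs', 'grand')
--
-- def all_trumps(gameType):
--     """Return the entire trump suit (list of str) for the given gameType."""
--     allTrumps = [] # For a null game, this will be returned unmodified.
--     if gameType != 'null':
--         if gameType != 'grand':
--             allTrumps += [val + gameType[0] for val in ORDER[:-1]]
--         allTrumps += ['j' + suit for suit in SUITS]
--     return allTrumps
--
-- def _run(first, rest):
--     """Length of the leading run of rest whose entries equal first."""
--     if not rest or rest[0] != first:
--         return 0
--     return 1 + _run(first, rest[1:])
--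
-- def jack_multiplier(heldTrumps, gameType):
--     """Return the jack multiplier (0 < int < 12), for calculating game value.
--
--     heldTrumps (list of str): Combined trump in kitty and declarer's hand.
--     """
--     assert gameType in GAMES
--     if gameType == 'null':
--         return None
--     # Presence table in top-down trump order; the answer is the length of the
--     # leading run agreeing with the top trump's presence.
--     present = [t in heldTrumps for t in reversed(all_trumps(gameType))]
--     return 1 + _run(present[0], present[1:])
-- ===== Notes on version B (the rewrite author's own statement) =====
-- stated objective: simpler
-- what changed: Instead of interleaving negative-index membership tests with break/for-else bookkeeping, B materialises the presence table in top-down trump order in one comprehension and returns 1 + the length of the leading run agreeing with the top trump's presence.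
import Mathlib
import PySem

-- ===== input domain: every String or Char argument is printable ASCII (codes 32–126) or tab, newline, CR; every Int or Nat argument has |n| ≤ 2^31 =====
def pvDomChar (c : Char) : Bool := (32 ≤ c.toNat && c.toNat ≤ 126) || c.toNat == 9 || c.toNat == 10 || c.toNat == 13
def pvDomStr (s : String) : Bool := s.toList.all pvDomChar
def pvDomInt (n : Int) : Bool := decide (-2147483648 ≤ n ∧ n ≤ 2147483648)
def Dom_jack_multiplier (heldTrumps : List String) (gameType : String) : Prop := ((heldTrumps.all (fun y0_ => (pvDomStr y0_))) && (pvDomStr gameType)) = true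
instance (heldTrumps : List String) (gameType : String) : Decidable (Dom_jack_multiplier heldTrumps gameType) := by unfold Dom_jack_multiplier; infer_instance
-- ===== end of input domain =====

-- B builds the presence table top-down in one pass and counts the leading run, instead of
-- A's for/else loop with negative indexing and break; objective: simpler (same cost).

-- ===== PORT A =====
-- module helper all_trumps (shared by both Pythons).
-- 'val + gameType[0]' indexes gameType; exact for nonempty gameType (guaranteed under
-- Pre_, where gameType ∈ GAMES); ported with headD as the (unreachable) default.
def pvAllTrumps (gameType : String) : List String :=
  let allTrumps : List String := []
  if gameType ≠ "null" then
    let allTrumps :=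
      if gameType ≠ "grand" then
        allTrumps ++ (PySem.List.slice "789qktaj".toList none (some (-1))).map
          (fun v => String.ofList [v, gameType.toList.headD ' '])
      else allTrumps
    allTrumps ++ "dshc".toList.map (fun s => String.ofList ['j', s])
  else allTrumps

-- A's for-loop over range(2, len+1) with break / for-else.
-- allTrumps[-i] is in range for every visited i under Pre_; the none branch is unreachable there.
-- The [] base case is the for-else path: i = len(allTrumps), then i += 1, return i - 1 = len.
def pvLoopA (allTrumps heldTrumps : List String) (hasHigh : Bool) : List Int → Int
  | [] => PySem.List.len allTrumps
  | i :: rest =>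
    let hasThis : Bool :=
      match PySem.List.pyGet? allTrumps (-i) with
      | some t => heldTrumps.contains t
      | none => false
    if hasThis != hasHigh then i - 1 else pvLoopA allTrumps heldTrumps hasHigh rest

def jack_multiplier (heldTrumps : List String) (gameType : String) : Option Int :=
  if gameType = "null" then none
  else
    let allTrumps := pvAllTrumps gameType
    let hasHighTrump := heldTrumps.contains "jc"
    some (pvLoopA allTrumps heldTrumps hasHighTrump
      (PySem.List.pyRange 2 (PySem.List.len allTrumps + 1) 1))

-- ===== PORT B =====
-- Source B's _run: length of the leading run of rest whose entries equal first.
def pvRun (first : Bool) : List Bool → Int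
  | [] => 0
  | b :: rest => if b == first then 1 + pvRun first rest else 0

-- present[0] raises IndexError only for an empty trump list, impossible under Pre_;
-- ported with headD as the (unreachable) default.
def jack_multiplier_alt (heldTrumps : List String) (gameType : String) : Option Int :=
  if gameType = "null" then none
  else
    let present := (pvAllTrumps gameType).reverse.map (fun t => heldTrumps.contains t)
    some (1 + pvRun (present.headD false) present.tail)

-- ===== PRECONDITION & SPEC =====
-- Pre_: the Python A asserts gameType in GAMES and raises AssertionError otherwise.
def Pre_jack_multiplier (heldTrumps : List String) (gameType : String) : Prop :=
  gameType ∈ (["null", "diamonds", "spades", "hearts", "clubs", "grand"] : List String)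
instance (heldTrumps : List String) (gameType : String) : Decidable (Pre_jack_multiplier heldTrumps gameType) := by unfold Pre_jack_multiplier; infer_instance

def pvWitness_jack_multiplier : List String × String := (["jc", "jd", "ah"], "hearts")

def Spec_jack_multiplier (heldTrumps : List String) (gameType : String) (out : Option Int) : Prop := out = jack_multiplier_alt heldTrumps gameType
instance (heldTrumps : List String) (gameType : String) (out : Option Int) : Decidable (Spec_jack_multiplier heldTrumps gameType out) := by unfold Spec_jack_multiplier; infer_instance

-- ===== CLAIM (what is proved, stated in full; the proofs are below) =====
def Claim_equal_jack_multiplier : Prop := ∀ (heldTrumps : List String) (gameType : String), Dom_jack_multiplier heldTrumps gameType → Pre_jack_multiplier heldTrumps gameType → Spec_jack_multiplier heldTrumps gameType (jack_multiplier heldTrumps gameType)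

-- ===== LEMMAS AND PROOFS =====

-- core invariant: A's loop from counter k equals (k-1) + the run length of the
-- remaining (reversed) presence suffix, as long as 2 ≤ k ≤ len + 1.
lemma pvLoopA_eq_run (ts held : List String) (hh : Bool) :
    ∀ (rs : List String) (k : Nat), 2 ≤ k → k ≤ ts.length + 1 →
      rs = ts.reverse.drop (k - 1) →
      pvLoopA ts held hh (PySem.List.pyRange (k : Int) ((ts.length : Int) + 1) 1)
        = ((k : Int) - 1) + pvRun hh (rs.map (fun t => held.contains t)) := by
  intro rs
  induction rs with
  | nil =>
    intro k hk2 hkle hdrop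
    have hlen : ts.length ≤ k - 1 := by
      have hl := congrArg List.length hdrop
      simp [List.length_drop, List.length_reverse] at hl
      omega
    have hk : k = ts.length + 1 := by omega
    subst hk
    rw [PySem.List.pyRange_one_eq_nil (by push_cast; omega)]
    simp [pvLoopA, pvRun, PySem.List.len]
  | cons b rest ih =>
    intro k hk2 hkle hdrop
    have hlt : k - 1 < ts.length := by
      have hl := congrArg List.length hdrop
      simp [List.length_drop, List.length_reverse] at hl
      omega
    have hget : PySem.List.pyGet? ts (-(k : Int)) = some b := by
      rw [PySem.List.pyGet?_neg_natCast ts k (by omega) (by omega)]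
      have h1 : ts.reverse[k - 1]? = some b := by
        rw [← List.head?_drop, ← hdrop]; rfl
      rw [List.getElem?_reverse (by omega)] at h1
      rw [show ts.length - k = ts.length - 1 - (k - 1) from by omega]
      exact h1
    rw [PySem.List.pyRange_one_cons (by omega)]
    simp only [pvLoopA, hget]
    by_cases hbc : held.contains b = hh
    · rw [if_neg (by simp only [bne_iff_ne, ne_eq, not_not]; simpa using hbc)]
      have hrest : rest = ts.reverse.drop (k + 1 - 1) := by
        rw [show k + 1 - 1 = (k - 1) + 1 from by omega, ← List.tail_drop, ← hdrop]
        rfl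
      have hrec := ih (k + 1) (by omega) (by omega) hrest
      push_cast at hrec
      rw [hrec, List.map_cons]
      simp only [pvRun]
      rw [if_pos (by simpa using hbc)]
      ring
    · rw [if_pos (by simp only [bne_iff_ne, ne_eq]; simpa using hbc)]
      rw [List.map_cons]
      simp only [pvRun]
      rw [if_neg (by simpa using hbc)]
      ring

lemma key (ts held : List String) (h : ts ≠ []) :
    pvLoopA ts held (held.contains (ts.getLast h))
        (PySem.List.pyRange 2 ((ts.length : Int) + 1) 1)
      = 1 + pvRun ((ts.reverse.map (fun t => held.contains t)).headD false)
              ((ts.reverse.map (fun t => held.contains t)).tail) := by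
  have hrev : ts.reverse = ts.getLast h :: ts.dropLast.reverse := by
    conv_lhs => rw [← List.dropLast_append_getLast h]
    rw [List.reverse_append]
    rfl
  have haux := pvLoopA_eq_run ts held (held.contains (ts.getLast h))
      ts.dropLast.reverse 2 (by omega)
      (by have := List.length_pos_iff.mpr h; omega)
      (by rw [hrev]; rfl)
  push_cast at haux
  rw [haux, hrev]
  simp

lemma game_case (held : List String) (g : String) (hne : ¬ g = "null")
    (hts : pvAllTrumps g ≠ []) (hlast : (pvAllTrumps g).getLast hts = "jc") :
    jack_multiplier held g = jack_multiplier_alt held g := by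
  simp only [jack_multiplier, jack_multiplier_alt, if_neg hne, PySem.List.len_eq, ← hlast]
  exact congrArg some (key _ held hts)

-- ===== VERDICT (by name: the statement is the Claim_ definition above) =====
theorem jack_multiplier_spec : Claim_equal_jack_multiplier := by
  intro held g _ hpre
  unfold Spec_jack_multiplier
  unfold Pre_jack_multiplier at hpre
  simp only [List.mem_cons, List.not_mem_nil, or_false] at hpre
  rcases hpre with h | h | h | h | h | h <;> subst h
  · rfl
  · exact game_case held _ (by decide) (by decide) (by decide)
  · exact game_case held _ (by decide) (by decide) (by decide)
  · exact game_case held _ (by decide) (by decide) (by decide)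
  · exact game_case held _ (by decide) (by decide) (by decide)
  · exact game_case held _ (by decide) (by decide) (by decide)
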